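-- pv_equiv track=rewrite | github.com/ferryman-charon/Advent-of-code-2024 | 2024/Aoc_2024_D23.py | node_hmap
-- ===== SOURCE A (Python) =====
-- from collections import defaultdict
--
-- def node_hmap(input:list[str])->dict[str,list[str]]:
--     hmap = defaultdict()
--     computers = [i.split('-') for i in input]
--     for c1, c2 in computers:
--         if c1 in hmap.keys(): hmap[c1].append(c2)
--         else: hmap[c1] = [c2]
--         if c2 in hmap.keys(): hmap[c2].append(c1)
--         else: hmap[c2] = [c1]
--     for key, value in hmap.items():
--         hmap[key] = set(value)
--     return hmap
-- ===== SOURCE B (Python) =====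
-- from collections import defaultdict
--
-- def node_hmap(input: list[str]) -> dict[str, list[str]]:
--     # Phase 1: flatten the undirected edge list into a directed pair list.
--     pairs = []
--     for line in input:
--         a, b = line.split('-')
--         pairs.append((a, b))
--         pairs.append((b, a))
--     # Phase 2: group by source key; one scan of the pair list per distinct key.
--     hmap = defaultdict()
--     for k, _ in pairs:
--         if k not in hmap:
--             hmap[k] = {v for x, v in pairs if x == k}
--     return hmap
-- ===== Notes on version B (the rewrite author's own statement) =====
-- stated objective: alternative
-- what changed: B is a flatten-then-group-by algorithm: it first expands every edge into the two directed pairs, then builds the map by scanning the full pair list once per distinct key, instead of A's per-edge incremental dict updates with membership branches followed by a second list-to-set conversion pass.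
import Mathlib
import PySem

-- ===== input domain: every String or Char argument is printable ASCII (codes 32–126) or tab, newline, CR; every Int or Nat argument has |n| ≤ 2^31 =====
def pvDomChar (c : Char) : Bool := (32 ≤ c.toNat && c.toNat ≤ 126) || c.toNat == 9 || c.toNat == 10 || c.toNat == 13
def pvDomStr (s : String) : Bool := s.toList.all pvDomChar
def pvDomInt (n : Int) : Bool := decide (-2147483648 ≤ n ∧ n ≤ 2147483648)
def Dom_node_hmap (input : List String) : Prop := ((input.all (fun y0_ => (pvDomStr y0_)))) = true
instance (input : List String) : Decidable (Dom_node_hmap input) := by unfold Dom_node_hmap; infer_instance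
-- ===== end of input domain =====

-- B replaces A's per-edge incremental dict building (membership branches + second
-- set-conversion pass) by a flatten-then-group-by algorithm: expand edges into directed
-- pairs, then scan the pair list once per distinct key; objective: alternative.


-- ===== PORT A =====
-- one iteration of A's first loop body for an already-unpacked edge endpoint pair
def pvAdjA (hmap : PySem.Dict String (List String)) (c1 c2 : String) : PySem.Dict String (List String) :=
  if hmap.contains c1 then hmap.insert c1 (hmap.getD c1 [] ++ [c2]) else hmap.insert c1 [c2]

-- A's first loop body: unpack 'c1, c2' (Pre_ guarantees exactly two parts; otherwise Python raises)
def pvStepA (hmap : PySem.Dict String (List String)) (c : List String) : PySem.Dict String (List String) :=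
  match c with
  | [c1, c2] => pvAdjA (pvAdjA hmap c1 c2) c2 c1
  | _ => hmap

def node_hmap (input : List String) : List (String × List String) :=
  let computers := input.map (fun i => (PySem.Str.split? i "-").getD [])
  let hmap := computers.foldl pvStepA PySem.Dict.empty
  (hmap.items.foldl (fun (d : PySem.Dict String (List String)) p => d.insert p.1 (PySem.Set.ofList p.2)) hmap).items

-- ===== PORT B =====
-- phase 1 loop body: 'a, b = line.split('-'); pairs.append((a,b)); pairs.append((b,a))'
-- (Pre_ guarantees the split has exactly two parts; otherwise Python raises)
def pvPairsStep (acc : List (String × String)) (line : String) : List (String × String) :=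
  match PySem.Str.split? line "-" with
  | some [a, b] => acc ++ [(a, b), (b, a)]
  | _ => acc

-- phase 2 loop body: 'if k not in hmap: hmap[k] = {v for x, v in pairs if x == k}'
def pvGroupStep (pairs : List (String × String)) (h : PySem.Dict String (List String))
    (p : String × String) : PySem.Dict String (List String) :=
  if h.contains p.1 then h
  else h.insert p.1 (PySem.Set.ofList ((pairs.filter (fun q => q.1 == p.1)).map (·.2)))

def node_hmap_alt (input : List String) : List (String × List String) :=
  let pairs := input.foldl pvPairsStep []
  (pairs.foldl (pvGroupStep pairs) PySem.Dict.empty).items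

-- ===== PRECONDITION & SPEC =====
-- Pre_ excludes exactly the inputs where some line does not split into two parts on '-',
-- on which Python A raises ValueError during tuple unpacking.
def Pre_node_hmap (input : List String) : Prop :=
  ∀ s ∈ input, ((PySem.Str.split? s "-").getD []).length = 2
instance (input : List String) : Decidable (Pre_node_hmap input) := by unfold Pre_node_hmap; infer_instance

def pvWitness_node_hmap : List String := ["a-b", "b-c", "a-b"]

def Spec_node_hmap (input : List String) (out : List (String × List String)) : Prop := out = node_hmap_alt input
instance (input : List String) (out : List (String × List String)) : Decidable (Spec_node_hmap input out) := by unfold Spec_node_hmap; infer_instance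

-- ===== CLAIM (what is proved, stated in full; the proofs are below) =====
def Claim_equal_node_hmap : Prop := ∀ (input : List String), Dom_node_hmap input → Pre_node_hmap input → Spec_node_hmap input (node_hmap input)

-- ===== LEMMAS AND PROOFS =====

-- the directed-pair list B's phase 1 builds, as a flatMap
def pvFlat (input : List String) : List (String × String) :=
  input.flatMap (fun line =>
    match PySem.Str.split? line "-" with
    | some [a, b] => [(a, b), (b, a)]
    | _ => [])

theorem pvPairs_eq (input : List String) :
    ∀ acc, input.foldl pvPairsStep acc = acc ++ pvFlat input := by
  induction input with
  | nil => intro acc; simp [pvFlat]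
  | cons line rest ih =>
    intro acc
    simp only [List.foldl_cons, pvFlat, List.flatMap_cons, ih, pvPairsStep]
    cases hs : PySem.Str.split? line "-" with
    | none => simp
    | some l =>
      match l with
      | [] => simp
      | [a] => simp
      | [a, b] => simp
      | a :: b :: c :: t => simp

-- A's first loop, uncurried to a fold over the directed-pair list
def pvStepP (d : PySem.Dict String (List String)) (p : String × String) : PySem.Dict String (List String) :=
  pvAdjA d p.1 p.2

theorem pvA_fold_eq (input : List String) (hpre : Pre_node_hmap input) :
    ∀ d, (input.map (fun i => (PySem.Str.split? i "-").getD [])).foldl pvStepA d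
      = (pvFlat input).foldl pvStepP d := by
  induction input with
  | nil => intro d; simp [pvFlat]
  | cons line rest ih =>
    intro d
    have hline := hpre line (by simp)
    have hrest : Pre_node_hmap rest := fun s hs => hpre s (by simp [hs])
    simp only [List.map_cons, List.foldl_cons, pvFlat, List.flatMap_cons]
    cases hs : PySem.Str.split? line "-" with
    | none => rw [hs] at hline; simp at hline
    | some l =>
      rw [hs] at hline
      match l with
      | [a, b] =>
        simp only [Option.getD_some] at hline ⊢
        rw [List.foldl_append]
        show (rest.map _).foldl pvStepA (pvStepA d [a, b]) = _
        rw [ih hrest]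
        rfl

-- the group-by characterisation of A's first-loop dict
def pvGroupChar (s : List (String × String)) : List (String × List String) :=
  (PySem.Set.ofList (s.map (·.1))).map
    (fun k => (k, (s.filter (fun q => q.1 == k)).map (·.2)))

theorem pvGroupChar_keys (s : List (String × String)) :
    (pvGroupChar s).map (·.1) = PySem.Set.ofList (s.map (·.1)) := by
  unfold pvGroupChar
  rw [List.map_map]
  exact List.map_id _

theorem pvFilter_append_singleton (s : List (String × String)) (p : String × String) (k : String) :
    ((s ++ [p]).filter (fun q => q.1 == k)).map (·.2)
      = (s.filter (fun q => q.1 == k)).map (·.2) ++ (if p.1 = k then [p.2] else []) := by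
  rw [List.filter_append, List.map_append]
  by_cases h : p.1 = k <;> simp [h]

theorem pvAInv (l : List (String × String)) :
    ∀ (s : List (String × String)) (d : PySem.Dict String (List String)),
      d.items = pvGroupChar s → d.keys.Nodup →
      (l.foldl pvStepP d).items = pvGroupChar (s ++ l) ∧ (l.foldl pvStepP d).keys.Nodup := by
  induction l with
  | nil => intro s d h hnd; simpa using ⟨h, hnd⟩
  | cons p rest ih =>
    intro s d h hnd
    have hkeys : d.keys = PySem.Set.ofList (s.map (·.1)) := by
      show d.items.map (·.1) = _
      rw [h, pvGroupChar_keys]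
    have hnd' : (pvStepP d p).keys.Nodup := by
      unfold pvStepP pvAdjA
      split_ifs <;> exact PySem.Dict.nodup_keys_insert _ _ _ hnd
    have hstep : (pvStepP d p).items = pvGroupChar (s ++ [p]) := by
      unfold pvStepP pvAdjA
      by_cases hc : d.contains p.1 = true
      · have hmem : p.1 ∈ s.map (·.1) := by
          rw [PySem.Dict.contains_iff_mem_keys, hkeys, PySem.Set.mem_ofList] at hc
          exact hc
        rw [if_pos hc, PySem.Dict.items_insert_of_contains _ _ hc, h]
        have hval : d.getD p.1 [] = (s.filter (fun q => q.1 == p.1)).map (·.2) := by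
          apply PySem.Dict.getD_of_mem_items d _ hnd
          rw [h]
          unfold pvGroupChar
          exact List.mem_map.2 ⟨p.1, by rw [PySem.Set.mem_ofList]; exact hmem, rfl⟩
        unfold pvGroupChar
        have hofl : PySem.Set.ofList ((s ++ [p]).map (·.1))
            = PySem.Set.ofList (s.map (·.1)) := by
          rw [List.map_append, List.map_cons, List.map_nil,
            PySem.Set.ofList_append_singleton, PySem.Set.add]
          rw [if_pos (by simpa [PySem.Set.contains] using hmem)]
        rw [hofl, List.map_map]
        apply List.map_congr_left
        intro k _
        by_cases hk : k = p.1
        · subst hk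
          simp only [Function.comp, beq_self_eq_true, if_pos]
          rw [hval, pvFilter_append_singleton, if_pos rfl]
        · have : (k == p.1) = false := by simpa using (Ne.symm (by exact fun e => hk e.symm))
          simp only [Function.comp, this, if_neg, Bool.false_eq_true, not_false_iff]
          rw [pvFilter_append_singleton, if_neg (fun e => hk e.symm)]
          simp
      · have hc' : d.contains p.1 = false := by simpa using hc
        have hnmem : p.1 ∉ s.map (·.1) := by
          rw [PySem.Dict.contains_eq_decide_mem_keys, hkeys] at hc'
          simpa [PySem.Set.mem_ofList] using hc'
        rw [if_neg (by simp [hc']), PySem.Dict.items_insert_of_not_contains _ _ hc', h]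
        unfold pvGroupChar
        have hofl : PySem.Set.ofList ((s ++ [p]).map (·.1))
            = PySem.Set.ofList (s.map (·.1)) ++ [p.1] := by
          rw [List.map_append, List.map_cons, List.map_nil,
            PySem.Set.ofList_append_singleton, PySem.Set.add]
          rw [if_neg (by simpa [PySem.Set.contains] using hnmem)]
        rw [hofl, List.map_append, List.map_cons, List.map_nil]
        congr 1
        · apply List.map_congr_left
          intro k hk
          rw [PySem.Set.mem_ofList] at hk
          have hkne : p.1 ≠ k := fun e => hnmem (e ▸ hk)
          rw [pvFilter_append_singleton, if_neg hkne]
          simp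
        · rw [pvFilter_append_singleton, if_pos rfl]
          have : s.filter (fun q => q.1 == p.1) = [] := by
            apply List.filter_eq_nil_iff.2
            intro q hq hqb
            exact hnmem (List.mem_map.2 ⟨q, hq, by simpa using hqb⟩)
          simp [this]
    have := ih (s ++ [p]) _ hstep hnd'
    simpa using this

-- B's phase-2 loop invariant (pairs is the full pair list, fixed)
theorem pvBInv (pairs : List (String × String)) (l : List (String × String)) :
    ∀ (s : List (String × String)) (d : PySem.Dict String (List String)),
      d.items = (PySem.Set.ofList (s.map (·.1))).map
        (fun k => (k, PySem.Set.ofList ((pairs.filter (fun q => q.1 == k)).map (·.2)))) →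
      d.keys.Nodup →
      (l.foldl (pvGroupStep pairs) d).items = (PySem.Set.ofList ((s ++ l).map (·.1))).map
        (fun k => (k, PySem.Set.ofList ((pairs.filter (fun q => q.1 == k)).map (·.2)))) := by
  induction l with
  | nil => intro s d h _; simpa using h
  | cons p rest ih =>
    intro s d h hnd
    have hkeys : d.keys = PySem.Set.ofList (s.map (·.1)) := by
      show d.items.map (·.1) = _
      rw [h, List.map_map]
      exact List.map_id _
    have hre : s ++ p :: rest = (s ++ [p]) ++ rest := by simp
    rw [List.foldl_cons, hre]
    by_cases hc : d.contains p.1 = true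
    · have hmem : p.1 ∈ s.map (·.1) := by
        rw [PySem.Dict.contains_iff_mem_keys, hkeys, PySem.Set.mem_ofList] at hc
        exact hc
      have hofl : PySem.Set.ofList ((s ++ [p]).map (·.1))
          = PySem.Set.ofList (s.map (·.1)) := by
        rw [List.map_append, List.map_cons, List.map_nil,
          PySem.Set.ofList_append_singleton, PySem.Set.add]
        rw [if_pos (by simpa [PySem.Set.contains] using hmem)]
      have hgs : pvGroupStep pairs d p = d := by unfold pvGroupStep; rw [if_pos hc]
      rw [hgs]
      exact ih (s ++ [p]) d (by rw [h, hofl]) hnd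
    · have hc' : d.contains p.1 = false := by simpa using hc
      have hnmem : p.1 ∉ s.map (·.1) := by
        rw [PySem.Dict.contains_eq_decide_mem_keys, hkeys] at hc'
        simpa [PySem.Set.mem_ofList] using hc'
      have hofl : PySem.Set.ofList ((s ++ [p]).map (·.1))
          = PySem.Set.ofList (s.map (·.1)) ++ [p.1] := by
        rw [List.map_append, List.map_cons, List.map_nil,
          PySem.Set.ofList_append_singleton, PySem.Set.add]
        rw [if_neg (by simpa [PySem.Set.contains] using hnmem)]
      have hgs : pvGroupStep pairs d p
          = d.insert p.1 (PySem.Set.ofList ((pairs.filter (fun q => q.1 == p.1)).map (·.2))) := by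
        unfold pvGroupStep; rw [if_neg (by simp [hc'])]
      rw [hgs]
      apply ih (s ++ [p])
      · rw [PySem.Dict.items_insert_of_not_contains _ _ hc', h, hofl]
        simp
      · exact PySem.Dict.nodup_keys_insert _ _ _ hnd

-- replacing the value at an already-present key touches exactly that entry
theorem pvMapReplace {α : Type} (k : String) (v : α) :
    ∀ (l : List (String × α)), (∀ q ∈ l, q.1 ≠ k) →
      l.map (fun q => if (q.1 == k) = true then (k, v) else q) = l := by
  intro l hl
  induction l with
  | nil => rfl
  | cons q t ih =>
    simp only [List.map_cons]
    rw [if_neg (by simpa using hl q (by simp)), ih (fun q hq => hl q (by simp [hq]))]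

theorem pvSecondPass (post : List (String × List String)) :
    ∀ (pre : List (String × List String)) (d : PySem.Dict String (List String)),
      d.keys.Nodup →
      d.items = pre.map (fun p => (p.1, PySem.Set.ofList p.2)) ++ post →
      (post.foldl (fun (d : PySem.Dict String (List String)) p => d.insert p.1 (PySem.Set.ofList p.2)) d).items
        = pre.map (fun p => (p.1, PySem.Set.ofList p.2)) ++ post.map (fun p => (p.1, PySem.Set.ofList p.2)) := by
  induction post with
  | nil => intro pre d _ hitems; simpa using hitems
  | cons p rest ih =>
    intro pre d hnd hitems
    simp only [List.foldl_cons]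
    have hkeys : d.keys = (pre.map (fun p => (p.1, PySem.Set.ofList p.2)) ++ p :: rest).map (·.1) := by
      simp only [PySem.Dict.keys, hitems]
    have hc : d.contains p.1 = true := by
      rw [PySem.Dict.contains_iff_mem_keys, hkeys]
      simp
    have hnd2 : ((pre.map (fun p => (p.1, PySem.Set.ofList p.2))).map (·.1)
        ++ p.1 :: rest.map (·.1)).Nodup := by
      have h0 : d.keys.Nodup := hnd
      have hk : d.keys = d.items.map (·.1) := rfl
      rw [hk, hitems] at h0
      simpa using h0
    have hdisj := List.disjoint_of_nodup_append hnd2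
    have hpre : ∀ q ∈ pre.map (fun p => (p.1, PySem.Set.ofList p.2)), q.1 ≠ p.1 := by
      intro q hq hqp
      exact hdisj (List.mem_map.2 ⟨q, hq, rfl⟩) (by simp [hqp])
    have hrest : ∀ q ∈ rest, q.1 ≠ p.1 := by
      intro q hq hqp
      exact (List.nodup_cons.1 (List.Nodup.of_append_right hnd2)).1
        (hqp ▸ List.mem_map.2 ⟨q, hq, rfl⟩)
    have hitems' : (d.insert p.1 (PySem.Set.ofList p.2)).items
        = (pre ++ [p]).map (fun p => (p.1, PySem.Set.ofList p.2)) ++ rest := by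
      rw [PySem.Dict.items_insert_of_contains _ _ hc, hitems]
      rw [List.map_append, List.map_cons]
      rw [pvMapReplace _ _ _ hpre, pvMapReplace _ _ _ hrest]
      simp
    have hnd' : (d.insert p.1 (PySem.Set.ofList p.2)).keys.Nodup :=
      PySem.Dict.nodup_keys_insert _ _ _ hnd
    have := ih (pre ++ [p]) _ hnd' hitems'
    rw [this]
    simp

-- ===== VERDICT (by name: the statement is the Claim_ definition above) =====
theorem node_hmap_spec : Claim_equal_node_hmap := by
  intro input _ hpre
  unfold Spec_node_hmap node_hmap node_hmap_alt
  simp only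
  -- A's first loop = fold over the flattened pair list
  rw [pvA_fold_eq input hpre, pvPairs_eq input []]
  simp only [List.nil_append]
  set pairs := pvFlat input with hpairs
  -- characterise A's first-loop dict
  obtain ⟨hitems, hnd⟩ := pvAInv pairs [] PySem.Dict.empty rfl PySem.Dict.nodup_keys_empty
  simp only [List.nil_append] at hitems
  -- A's second pass converts every value with Set.ofList, in place
  rw [pvSecondPass _ [] _ hnd (by simp)]
  -- B's phase-2 loop builds the same items directly
  rw [pvBInv pairs pairs [] PySem.Dict.empty (by rfl) PySem.Dict.nodup_keys_empty]
  rw [hitems]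
  unfold pvGroupChar
  simp [List.map_map]
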